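-- pv_equiv track=rewrite | github.com/HoangcoderIkci/NewCodes | theoryNumber/codePy/nhanchiadathuc/bgph.py | chuan_hoa_he_so
-- ===== SOURCE A (Python) =====
-- def chuan_hoa_he_so(coefficients):
--     # tim
--     leng = len(coefficients)
--     id_last = 0
--     for i in range(leng, 0, -1):
--         if coefficients[i-1]:
--             id_last = i
--             break
--     coefficients = coefficients[:id_last]
--     if not isinstance(coefficients,list):
--         return [coefficients]
--     return coefficients
-- ===== SOURCE B (Python) =====
-- def chuan_hoa_he_so(coefficients):
--     # Forward pass: n = position after the last nonzero coefficient.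
--     n = 0
--     for i, c in enumerate(coefficients):
--         if c:
--             n = i + 1
--     return coefficients[:n]
-- ===== Notes on version B (the rewrite author's own statement) =====
-- stated objective: simpler
-- what changed: Backward scan with break replaced by a single forward enumerate pass recording the position after the last truthy coefficient; the dead isinstance guard (always true for a list slice) is dropped.
import Mathlib
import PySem

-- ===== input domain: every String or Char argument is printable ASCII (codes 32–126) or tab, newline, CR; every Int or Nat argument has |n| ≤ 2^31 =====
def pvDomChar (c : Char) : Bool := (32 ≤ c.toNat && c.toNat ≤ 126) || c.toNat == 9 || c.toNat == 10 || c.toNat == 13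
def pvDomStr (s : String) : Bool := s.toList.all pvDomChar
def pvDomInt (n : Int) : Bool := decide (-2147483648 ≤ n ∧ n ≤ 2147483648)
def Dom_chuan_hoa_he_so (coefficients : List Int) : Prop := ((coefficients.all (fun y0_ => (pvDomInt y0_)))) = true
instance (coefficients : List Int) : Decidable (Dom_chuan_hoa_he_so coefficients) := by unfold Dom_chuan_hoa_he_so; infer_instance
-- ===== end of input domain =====

-- B replaces A's backward break-scan by one forward enumerate pass (simpler; A's isinstance guard is dead for a list input).


-- ===== PORT A =====
-- the 'for i in range(leng, 0, -1): if coefficients[i-1]: id_last = i; break' loop,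
-- recursing over the range list; id_last starts at 0
def chuanLoopA (xs : List Int) : List Int → Int
  | [] => 0
  | i :: rest => if PySem.List.pyGetD xs (i - 1) 0 ≠ 0 then i else chuanLoopA xs rest

def chuan_hoa_he_so (coefficients : List Int) : List Int :=
  let leng : Int := coefficients.length
  let id_last := chuanLoopA coefficients (PySem.List.pyRange leng 0 (-1))
  -- coefficients[:id_last]; the 'isinstance(…, list)' branch is always true for a List Int
  PySem.List.slice coefficients none (some id_last)

-- ===== PORT B =====
def chuan_hoa_he_so_alt (coefficients : List Int) : List Int :=
  let n := (PySem.List.enumerate coefficients 0).foldl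
    (fun acc (p : Int × Int) => if p.2 ≠ 0 then p.1 + 1 else acc) 0
  PySem.List.slice coefficients none (some n)

-- ===== PRECONDITION & SPEC =====
def Spec_chuan_hoa_he_so (coefficients : List Int) (out : List Int) : Prop := out = chuan_hoa_he_so_alt coefficients
instance (coefficients : List Int) (out : List Int) : Decidable (Spec_chuan_hoa_he_so coefficients out) := by unfold Spec_chuan_hoa_he_so; infer_instance

-- ===== CLAIM (what is proved, stated in full; the proofs are below) =====
def Claim_equal_chuan_hoa_he_so : Prop := ∀ (coefficients : List Int), Dom_chuan_hoa_he_so coefficients → Spec_chuan_hoa_he_so coefficients (chuan_hoa_he_so coefficients)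

-- ===== LEMMAS AND PROOFS =====

-- appending an element does not change A's loop on a range of indices that stay inside xs
theorem chuanLoopA_append (xs : List Int) (c : Int) (l : List Int)
    (h : ∀ i ∈ l, 0 < i ∧ i ≤ (xs.length : Int)) :
    chuanLoopA (xs ++ [c]) l = chuanLoopA xs l := by
  induction l with
  | nil => rfl
  | cons i rest ih =>
    obtain ⟨h1, h2⟩ := h i (List.mem_cons_self ..)
    have hget : PySem.List.pyGetD (xs ++ [c]) (i - 1) 0 = PySem.List.pyGetD xs (i - 1) 0 := by
      rw [PySem.List.pyGetD_eq_getElem (xs ++ [c]) (i := i - 1) 0 (by omega)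
            (by simp only [List.length_append, List.length_singleton, Nat.cast_add]; omega),
          PySem.List.pyGetD_eq_getElem xs (i := i - 1) 0 (by omega) (by omega)]
      rw [List.getElem_append_left (by omega)]
    simp only [chuanLoopA, hget]
    split
    · rfl
    · exact ih (fun j hj => h j (List.mem_cons_of_mem _ hj))

-- A's loop result on the full countdown range, snoc step
theorem aIdx_snoc (xs : List Int) (c : Int) :
    chuanLoopA (xs ++ [c]) (PySem.List.pyRange ((xs ++ [c]).length : Int) 0 (-1))
      = if c ≠ 0 then (xs.length : Int) + 1
        else chuanLoopA xs (PySem.List.pyRange (xs.length : Int) 0 (-1)) := by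
  have hlen : ((xs ++ [c]).length : Int) = (xs.length : Int) + 1 := by
    simp
  rw [hlen, PySem.List.pyRange_neg_one_cons (by positivity)]
  have hget : PySem.List.pyGetD (xs ++ [c]) ((xs.length : Int)) 0 = c := by
    rw [PySem.List.pyGetD_eq_getElem (xs ++ [c]) (i := (xs.length : Int)) 0 (by positivity)
          (by simp only [List.length_append, List.length_singleton, Nat.cast_add]; omega)]
    simp
  simp only [chuanLoopA, add_sub_cancel_right, hget]
  by_cases hc : c = 0
  · rw [if_neg (by simp [hc]), if_neg (by simp [hc])]
    exact chuanLoopA_append xs c (PySem.List.pyRange (xs.length : Int) 0 (-1))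
      (fun i hi => by
        have := (PySem.List.mem_pyRange_neg_one (a := (xs.length : Int)) (b := 0)).mp hi
        omega)
  · simp [hc]

-- B's fold, snoc step
theorem bIdx_snoc (xs : List Int) (c : Int) :
    (PySem.List.enumerate (xs ++ [c]) 0).foldl
        (fun acc (p : Int × Int) => if p.2 ≠ 0 then p.1 + 1 else acc) 0
      = if c ≠ 0 then (xs.length : Int) + 1
        else (PySem.List.enumerate xs 0).foldl
              (fun acc (p : Int × Int) => if p.2 ≠ 0 then p.1 + 1 else acc) 0 := by
  have henum : ∀ (ys : List Int) (s : Int),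
      PySem.List.enumerate (ys ++ [c]) s
        = PySem.List.enumerate ys s ++ [(s + ys.length, c)] := by
    intro ys
    induction ys with
    | nil => intro s; simp [PySem.List.enumerate_cons, PySem.List.enumerate_nil]
    | cons y ys ih =>
      intro s
      simp only [List.cons_append, PySem.List.enumerate_cons, ih, List.length_cons]
      have : (s + 1 + (ys.length : Int)) = s + ((ys.length + 1 : Nat) : Int) := by push_cast; ring
      rw [this]
  rw [henum, List.foldl_append]
  simp

-- the two computed cut positions agree
theorem idx_eq (xs : List Int) :
    chuanLoopA xs (PySem.List.pyRange (xs.length : Int) 0 (-1))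
      = (PySem.List.enumerate xs 0).foldl
          (fun acc (p : Int × Int) => if p.2 ≠ 0 then p.1 + 1 else acc) 0 := by
  induction xs using List.reverseRecOn with
  | nil => rfl
  | append_singleton xs c ih =>
    rw [aIdx_snoc, bIdx_snoc, ih]

-- ===== VERDICT (by name: the statement is the Claim_ definition above) =====
theorem chuan_hoa_he_so_spec : Claim_equal_chuan_hoa_he_so := by
  intro xs _
  unfold Spec_chuan_hoa_he_so chuan_hoa_he_so chuan_hoa_he_so_alt
  simp only [idx_eq]
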